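-- pv_equiv track=rewrite | github.com/wanxu2019/PythonPractice | exam/zsyhxykzx/test3.py | is_good_number
-- ===== SOURCE A (Python) =====
-- def is_good_number(n):
--     bad_numbers = ['3', '4', '7']
--     good_numbers = ['2', '5', '6', '9']
--     n_str = str(n)
--     has_good_number = False
--     for ch in n_str:
--         if ch in bad_numbers:
--             return False
--         elif ch in good_numbers:
--             if not has_good_number:
--                 has_good_number = True
--     return has_good_number
-- ===== SOURCE B (Python) =====
-- def is_good_number(n):
--     ok, good, m = True, False, abs(n)
--     while m:
--         d = m % 10
--         if d in (3, 4, 7):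
--             ok = False
--         elif d in (2, 5, 6, 9):
--             good = True
--         m //= 10
--     return ok and good
-- ===== Notes on version B (the rewrite author's own statement) =====
-- stated objective: alternative
-- what changed: Replaces A's scan over str(n) with early return and a flag by pure integer arithmetic: extract the digits of abs(n) with % 10 and // 10 (no string conversion, no early exit), tracking ok/good flags and returning their conjunction.
import Mathlib
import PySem

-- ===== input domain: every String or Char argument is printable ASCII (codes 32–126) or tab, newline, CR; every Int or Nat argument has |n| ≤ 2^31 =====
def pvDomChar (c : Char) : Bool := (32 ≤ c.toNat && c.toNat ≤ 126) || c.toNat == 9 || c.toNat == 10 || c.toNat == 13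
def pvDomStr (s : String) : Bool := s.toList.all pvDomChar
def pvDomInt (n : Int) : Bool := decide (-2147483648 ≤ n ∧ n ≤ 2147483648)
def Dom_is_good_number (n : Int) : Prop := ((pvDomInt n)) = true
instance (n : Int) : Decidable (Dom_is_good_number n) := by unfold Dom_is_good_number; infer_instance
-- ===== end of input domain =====

-- B replaces A's scan over str(n) by pure integer arithmetic on abs(n) (digits via % 10 and // 10, no string conversion, no early exit); same asymptotic cost.


-- ===== PORT A =====
-- A's for-loop over str(n): early `return False` on a bad digit, a flag for good digits
def pvLoopA : List Char → Bool → Bool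
  | [], h => h
  | c :: cs, h =>
    if c ∈ ['3', '4', '7'] then false
    else if c ∈ ['2', '5', '6', '9'] then pvLoopA cs (if !h then true else h)
    else pvLoopA cs h

def is_good_number (n : Int) : Bool :=
  pvLoopA (PySem.Int.toStr n).toList false

-- ===== PORT B =====
-- Source B's while loop over m = abs(n): d = m % 10; bad clears ok, good sets good; m //= 10.
-- m is nonnegative throughout, so Nat's % and / coincide exactly with Python's % and //.
def pvLoopB (m : Nat) (ok good : Bool) : Bool × Bool :=
  if hm : m = 0 then (ok, good)
  else
    if m % 10 = 3 ∨ m % 10 = 4 ∨ m % 10 = 7 then pvLoopB (m / 10) false good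
    else if m % 10 = 2 ∨ m % 10 = 5 ∨ m % 10 = 6 ∨ m % 10 = 9 then pvLoopB (m / 10) ok true
    else pvLoopB (m / 10) ok good
  termination_by m
  decreasing_by all_goals exact Nat.div_lt_self (Nat.pos_of_ne_zero hm) (by norm_num)

def is_good_number_alt (n : Int) : Bool :=
  let r := pvLoopB n.natAbs true false   -- abs(n)
  r.1 && r.2                             -- ok and good

-- ===== PRECONDITION & SPEC =====
def Spec_is_good_number (n : Int) (out : Bool) : Prop := out = is_good_number_alt n
instance (n : Int) (out : Bool) : Decidable (Spec_is_good_number n out) := by unfold Spec_is_good_number; infer_instance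

-- ===== CLAIM (what is proved, stated in full; the proofs are below) =====
def Claim_equal_is_good_number : Prop := ∀ (n : Int), Dom_is_good_number n → Spec_is_good_number n (is_good_number n)

-- ===== LEMMAS AND PROOFS =====

-- the decimal digit characters of m, most significant first (proof-side mirror of Nat.toDigits 10)
def pvChars (m : Nat) : List Char :=
  if h : m / 10 = 0 then [Nat.digitChar (m % 10)]
  else pvChars (m / 10) ++ [Nat.digitChar (m % 10)]
  termination_by m
  decreasing_by
    exact Nat.div_lt_self (Nat.pos_of_ne_zero (fun h0 => h (by simp [h0]))) (by norm_num)

theorem toDigitsCore_eq_pvChars :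
    ∀ (f m : Nat) (acc : List Char), m ≤ f →
      Nat.toDigitsCore 10 (f + 1) m acc = pvChars m ++ acc := by
  intro f
  induction f with
  | zero =>
    intro m acc hm
    interval_cases m
    simp [Nat.toDigitsCore, pvChars]
  | succ f ih =>
    intro m acc hm
    rw [Nat.toDigitsCore]
    by_cases h : m / 10 = 0
    · rw [if_pos h, pvChars, dif_pos h]
      simp
    · rw [if_neg h, pvChars, dif_neg h]
      rw [ih (m / 10) _ (by
        have h1 : m / 10 < m := Nat.div_lt_self (Nat.pos_of_ne_zero (fun h0 => h (by simp [h0]))) (by norm_num)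
        omega)]
      simp

theorem toDigits_eq_pvChars (m : Nat) : Nat.toDigits 10 m = pvChars m := by
  have := toDigitsCore_eq_pvChars m m [] le_rfl
  simpa [Nat.toDigits] using this

-- characterisation of A's loop: no bad digit, and (flag or some good digit)
theorem pvLoopA_eq (cs : List Char) (h : Bool) :
    pvLoopA cs h = ((cs.all (fun c => !decide (c ∈ ['3','4','7']))) && (h || cs.any (fun c => decide (c ∈ ['2','5','6','9'])))) := by
  induction cs generalizing h with
  | nil => simp [pvLoopA]
  | cons c cs ih =>
    simp only [pvLoopA, List.all_cons, List.any_cons]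
    by_cases hb : c ∈ ['3','4','7']
    · simp only [hb, if_pos, decide_true, Bool.not_true, Bool.false_and]
    · by_cases hg : c ∈ ['2','5','6','9']
      · rw [if_neg hb, if_pos hg, ih]
        cases h <;> simp [hb, hg]
      · rw [if_neg hb, if_neg hg, ih]
        simp [hb, hg]

-- the digit characters classify exactly as their digit values
theorem digitChar_bad (d : Nat) (hd : d < 10) :
    (!decide (Nat.digitChar d ∈ ['3','4','7'])) = !decide (d = 3 ∨ d = 4 ∨ d = 7) := by
  interval_cases d <;> decide

theorem digitChar_good (d : Nat) (hd : d < 10) :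
    decide (Nat.digitChar d ∈ ['2','5','6','9']) = decide (d = 2 ∨ d = 5 ∨ d = 6 ∨ d = 9) := by
  interval_cases d <;> decide

-- characterisation of B's loop in terms of the digit-character list
theorem pvLoopB_zero (ok good : Bool) : pvLoopB 0 ok good = (ok, good) := by
  rw [pvLoopB]; simp

theorem pvLoopB_eq : ∀ (m : Nat) (ok good : Bool),
    ((pvLoopB m ok good).1 && (pvLoopB m ok good).2) =
      ((ok && (pvChars m).all (fun c => !decide (c ∈ ['3','4','7']))) &&
        (good || (pvChars m).any (fun c => decide (c ∈ ['2','5','6','9'])))) := by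
  intro m
  induction m using Nat.strong_induction_on with
  | _ m ih =>
    intro ok good
    by_cases hm : m = 0
    · subst hm
      rw [pvLoopB, pvChars]
      cases ok <;> cases good <;> decide
    · have hds : m % 10 < 10 := Nat.mod_lt _ (by norm_num)
      have hlt : m / 10 < m := Nat.div_lt_self (Nat.pos_of_ne_zero hm) (by norm_num)
      rw [pvLoopB, dif_neg hm]
      by_cases h10 : m / 10 = 0
      · -- single digit: pvChars m = [digitChar (m % 10)], and the inner call is pvLoopB 0
        rw [pvChars, dif_pos h10, h10]
        split_ifs with hb hg
        · simp only [pvLoopB_zero, List.all_cons, List.all_nil, List.any_cons, List.any_nil,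
            digitChar_bad _ hds, digitChar_good _ hds, Bool.and_true, Bool.or_false]
          cases ok <;> cases good <;> simp [hb]
        · simp only [pvLoopB_zero, List.all_cons, List.all_nil, List.any_cons, List.any_nil,
            digitChar_bad _ hds, digitChar_good _ hds, Bool.and_true, Bool.or_false]
          cases ok <;> cases good <;> simp [hb, hg]
        · simp only [pvLoopB_zero, List.all_cons, List.all_nil, List.any_cons, List.any_nil,
            digitChar_bad _ hds, digitChar_good _ hds, Bool.and_true, Bool.or_false]
          cases ok <;> cases good <;> simp [hb, hg]
      · rw [pvChars, dif_neg h10]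
        split_ifs with hb hg
        · rw [ih _ hlt]
          simp only [List.all_append, List.any_append, List.all_cons, List.all_nil,
            List.any_cons, List.any_nil, digitChar_bad _ hds, digitChar_good _ hds,
            Bool.and_true, Bool.or_false]
          cases ok <;> cases good <;> simp [hb]
        · rw [ih _ hlt]
          simp only [List.all_append, List.any_append, List.all_cons, List.all_nil,
            List.any_cons, List.any_nil, digitChar_bad _ hds, digitChar_good _ hds,
            Bool.and_true, Bool.or_false]
          cases ok <;> cases good <;> simp [hb, hg]
        · rw [ih _ hlt]
          simp only [List.all_append, List.any_append, List.all_cons, List.all_nil,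
            List.any_cons, List.any_nil, digitChar_bad _ hds, digitChar_good _ hds,
            Bool.and_true, Bool.or_false]
          cases ok <;> cases good <;> simp [hb, hg]

-- ===== VERDICT (by name: the statement is the Claim_ definition above) =====
theorem is_good_number_spec : Claim_equal_is_good_number := by
  intro n _
  unfold Spec_is_good_number is_good_number is_good_number_alt
  rw [PySem.Int.toList_toStr]
  rw [pvLoopB_eq]
  unfold PySem.Int.toChars
  by_cases hn : n < 0
  · rw [if_pos hn, toDigits_eq_pvChars]
    have hminus : pvLoopA ('-' :: pvChars n.natAbs) false = pvLoopA (pvChars n.natAbs) false := by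
      simp [pvLoopA]
    rw [hminus, pvLoopA_eq]
    simp
  · rw [if_neg hn, toDigits_eq_pvChars]
    have : n.toNat = n.natAbs := by omega
    rw [this, pvLoopA_eq]
    simp
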